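-- pv_equiv track=rewrite | github.com/sshishov/sshishov.github.io | codility/04_lesson/01_FrogRiverOne.py | solution
-- ===== SOURCE A (Python) =====
-- def solution(X, A):
--     # write your code in Python 2.7
--     lenA = len(A)
--     B = [None] * X
--     for index in range(lenA):
--         if B[A[index] - 1] is None:
--             B[A[index] - 1] = index
--     if None not in B:
--         return max(B)
--     return -1
-- ===== SOURCE B (Python) =====
-- def solution(X, A):
--     # Count how often each river position is covered (cnt[a-1], same list
--     # indexing as the original), then scan from the right: the first index
--     # (from the right) whose position's count drops to zero is the latest
--     # first occurrence, i.e. the moment the river became fully covered.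
--     cnt = [0] * X
--     for a in A:
--         cnt[a - 1] += 1
--     if 0 in cnt:
--         return -1
--     for i in range(len(A) - 1, -1, -1):
--         cnt[A[i] - 1] -= 1
--         if cnt[A[i] - 1] == 0:
--             return i
--     return -1
-- ===== Notes on version B (the rewrite author's own statement) =====
-- stated objective: alternative
-- what changed: B drops A's first-occurrence table, its 'None in B' membership scan and its max(B) scan entirely: it builds an occurrence-count histogram, rejects with -1 if some count is zero, and otherwise scans A right-to-left decrementing counts, returning the first index whose count drops to zero (= the latest first occurrence, which is exactly A's max of first occurrences).
import Mathlib
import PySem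

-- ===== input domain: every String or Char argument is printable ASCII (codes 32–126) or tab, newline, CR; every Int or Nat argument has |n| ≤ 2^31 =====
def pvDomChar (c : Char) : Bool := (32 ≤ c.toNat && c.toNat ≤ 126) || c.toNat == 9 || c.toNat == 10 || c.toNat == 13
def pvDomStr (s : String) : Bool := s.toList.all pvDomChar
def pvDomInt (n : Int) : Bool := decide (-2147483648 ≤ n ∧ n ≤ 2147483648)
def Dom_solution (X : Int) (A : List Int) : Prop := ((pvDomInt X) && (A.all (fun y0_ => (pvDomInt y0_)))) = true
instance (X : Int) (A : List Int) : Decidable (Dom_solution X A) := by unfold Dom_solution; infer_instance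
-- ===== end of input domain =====

-- B replaces A's first-occurrence table + 'None in B' + max(B) scans with an occurrence-count
-- histogram and a right-to-left scan returning the latest first occurrence (objective: alternative).


-- ===== PORT A =====
-- the 'for index in range(lenA)' loop: B[A[index]-1] read/write with Python (negative) indexing
def aLoop : List Int → Int → List (Option Int) → List (Option Int)
  | [], _, B => B
  | a :: rest, idx, B =>
    if PySem.List.pyGetD B (a - 1) none = none then
      aLoop rest (idx + 1) (PySem.List.pySetD B (a - 1) (some idx))
    else
      aLoop rest (idx + 1) B

def solution (X : Int) (A : List Int) : Int :=
  let Bf := aLoop A 0 (List.replicate X.toNat none)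
  -- 'max(B)' over the (all-int) entries; the .getD 0 default is only reached where Python
  -- raises ValueError on max([]) (excluded by Pre_)
  if ¬ (none ∈ Bf) then (PySem.List.max? (Bf.filterMap id) (fun v => v)).getD 0 else -1

-- ===== PORT B =====
-- 'for a in A: cnt[a-1] += 1' (same Python negative-index read/write)
def cntLoop : List Int → List Int → List Int
  | [], cnt => cnt
  | a :: rest, cnt =>
    cntLoop rest (PySem.List.pySetD cnt (a - 1) (PySem.List.pyGetD cnt (a - 1) 0 + 1))

-- 'for i in range(len(A)-1, -1, -1): cnt[A[i]-1] -= 1; if cnt[A[i]-1] == 0: return i'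
-- transcribed as a walk over A.reverse carrying the decreasing index i
def revLoop : List Int → Int → List Int → Int
  | [], _, _ => -1
  | a :: rest, i, cnt =>
    let c := PySem.List.pyGetD cnt (a - 1) 0 - 1
    if c = 0 then i else revLoop rest (i - 1) (PySem.List.pySetD cnt (a - 1) c)

def solution_alt (X : Int) (A : List Int) : Int :=
  let cnt := cntLoop A (List.replicate X.toNat 0)
  if (0 : Int) ∈ cnt then -1
  else revLoop A.reverse ((A.length : Int) - 1) cnt

-- ===== PRECONDITION & SPEC =====
-- Pre_ is exactly the set of inputs on which the Python A returns: X ≥ 1 (with X ≤ 0 the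
-- table is [] and A raises IndexError on any element, ValueError via max([]) on empty A)
-- and every element indexes the table without IndexError (Python negative wraparound allowed).
def Pre_solution (X : Int) (A : List Int) : Prop :=
  1 ≤ X ∧ ∀ a ∈ A, 1 - X ≤ a ∧ a ≤ X
instance (X : Int) (A : List Int) : Decidable (Pre_solution X A) := by unfold Pre_solution; infer_instance

def pvWitness_solution : Int × List Int := (3, [1, 3, 1, 2, 3])

def Spec_solution (X : Int) (A : List Int) (out : Int) : Prop := out = solution_alt X A
instance (X : Int) (A : List Int) (out : Int) : Decidable (Spec_solution X A out) := by unfold Spec_solution; infer_instance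

-- ===== CLAIM (what is proved, stated in full; the proofs are below) =====
def Claim_equal_solution : Prop := ∀ (X : Int) (A : List Int), Dom_solution X A → Pre_solution X A → Spec_solution X A (solution X A)

-- ===== LEMMAS AND PROOFS =====

-- the river position (0-based table index) covered by value a, = Python's wrapped index a-1
def pid (X a : Int) : Nat := ((a - 1) % X).toNat

-- number of elements of L covering position p
def hits (X : Int) (p : Nat) (L : List Int) : Nat := L.countP (fun a => pid X a == p)

-- index of the first element of L covering position p
def firstHit (X : Int) (p : Nat) : List Int → Option Nat
  | [] => none
  | a :: rest => if pid X a = p then some 0 else (firstHit X p rest).map (· + 1)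

lemma pyIdx_val (n : Nat) (i : Int) (h1 : -(n : Int) ≤ i) (h2 : i < n) :
    PySem.List.pyIdx? n i = some (if 0 ≤ i then i.toNat else n - (-i).toNat) := by
  unfold PySem.List.pyIdx?
  by_cases h0 : 0 ≤ i
  · simp [h0, h2]
  · simp [h0, h1]

lemma pid_spec (X a : Int) (hX : 1 ≤ X) (h1 : 1 - X ≤ a) (h2 : a ≤ X) :
    (if 0 ≤ a - 1 then (a - 1).toNat else X.toNat - (-(a - 1)).toNat) = pid X a ∧
      pid X a < X.toNat := by
  have he : (a - 1) % X = if 0 ≤ a - 1 then a - 1 else a - 1 + X := by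
    split_ifs with h0
    · exact Int.emod_eq_of_lt h0 (by omega)
    · have h' := Int.add_mul_emod_self_left (a - 1) X 1
      rw [mul_one] at h'
      rw [← h']
      exact Int.emod_eq_of_lt (by omega) (by omega)
  unfold pid
  rw [he]
  split_ifs with h0 <;> exact ⟨by omega, by omega⟩

lemma pid_lt (X a : Int) (hX : 1 ≤ X) (h1 : 1 - X ≤ a) (h2 : a ≤ X) : pid X a < X.toNat :=
  (pid_spec X a hX h1 h2).2

lemma pyIdx_pid (X a : Int) (hX : 1 ≤ X) (h1 : 1 - X ≤ a) (h2 : a ≤ X) :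
    PySem.List.pyIdx? X.toNat (a - 1) = some (pid X a) := by
  rw [pyIdx_val X.toNat (a - 1) (by omega) (by omega), (pid_spec X a hX h1 h2).1]

lemma pyGetD_pid {α : Type} (X a : Int) (L : List α) (d : α) (hX : 1 ≤ X)
    (h1 : 1 - X ≤ a) (h2 : a ≤ X) (hlen : L.length = X.toNat) :
    PySem.List.pyGetD L (a - 1) d = L.getD (pid X a) d := by
  have hk : PySem.List.pyIdx? L.length (a - 1) = some (pid X a) := by
    rw [hlen]; exact pyIdx_pid X a hX h1 h2
  have hlt : pid X a < L.length := by rw [hlen]; exact pid_lt X a hX h1 h2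
  simp [PySem.List.pyGetD, PySem.List.pyGet?, hk, List.getD,
    List.getElem?_eq_getElem hlt]

lemma pySetD_pid {α : Type} (X a : Int) (L : List α) (v : α) (hX : 1 ≤ X)
    (h1 : 1 - X ≤ a) (h2 : a ≤ X) (hlen : L.length = X.toNat) :
    PySem.List.pySetD L (a - 1) v = L.set (pid X a) v := by
  have hk : PySem.List.pyIdx? L.length (a - 1) = some (pid X a) := by
    rw [hlen]; exact pyIdx_pid X a hX h1 h2
  simp [PySem.List.pySetD, PySem.List.pySet?, hk]

lemma getD_set {α : Type} (l : List α) (i j : Nat) (v d : α) (hj : j < l.length) :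
    (l.set i v).getD j d = if i = j then v else l.getD j d := by
  rw [List.getD_eq_getElem _ _ (by simpa using hj), List.getElem_set,
    List.getD_eq_getElem _ _ hj]

-- ---------- firstHit facts ----------

lemma firstHit_none_iff (X : Int) (p : Nat) (L : List Int) :
    firstHit X p L = none ↔ hits X p L = 0 := by
  induction L with
  | nil => simp [firstHit, hits]
  | cons a rest ih =>
    by_cases h : pid X a = p
    · simp [firstHit, hits, h, List.countP_cons]
    · simp [firstHit, hits, h, List.countP_cons] at ih ⊢
      exact ih

lemma firstHit_some (X : Int) (p : Nat) (L : List Int) (j : Nat)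
    (h : firstHit X p L = some j) :
    ∃ hj : j < L.length, pid X (L[j]) = p ∧ hits X p (L.take j) = 0 := by
  induction L generalizing j with
  | nil => simp [firstHit] at h
  | cons a rest ih =>
    by_cases hp : pid X a = p
    · simp [firstHit, hp] at h
      subst h
      exact ⟨by simp, by simpa using hp, by simp [hits]⟩
    · simp [firstHit, hp] at h
      obtain ⟨j', hj', rfl⟩ := h
      obtain ⟨hlt, hpid, htake⟩ := ih j' hj'
      refine ⟨by simpa using Nat.succ_lt_succ hlt, by simpa using hpid, ?_⟩
      simpa [hits, List.countP_cons, hp] using htake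

lemma firstHit_of (X : Int) (p : Nat) (L : List Int) (j : Nat) (hj : j < L.length)
    (hpid : pid X (L[j]) = p) (htake : hits X p (L.take j) = 0) :
    firstHit X p L = some j := by
  induction L generalizing j with
  | nil => simp at hj
  | cons a rest ih =>
    cases j with
    | zero => simp at hpid; simp [firstHit, hpid]
    | succ j' =>
      have hp : pid X a ≠ p := by
        simp [hits, List.countP_cons] at htake
        simpa using htake.2
      have htake' : hits X p (rest.take j') = 0 := by
        simp [hits, List.countP_cons, hp] at htake
        simpa [hits] using htake
      simp [firstHit, hp, ih j' (by simpa using hj) (by simpa using hpid) htake']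

-- ---------- A-side characterization ----------

lemma aLoop_len (A : List Int) : ∀ (idx : Int) (B : List (Option Int)),
    (aLoop A idx B).length = B.length := by
  induction A with
  | nil => intro idx B; rfl
  | cons a rest ih =>
    intro idx B
    unfold aLoop
    by_cases h : PySem.List.pyGetD B (a - 1) none = none
    · simp [h, ih]
    · simp [h, ih]

lemma aLoop_char (X : Int) (hX : 1 ≤ X) :
    ∀ (A : List Int) (idx : Int) (B : List (Option Int)),
    (∀ a ∈ A, 1 - X ≤ a ∧ a ≤ X) → B.length = X.toNat → ∀ p, p < X.toNat →
    (aLoop A idx B).getD p none =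
      (B.getD p none).or ((firstHit X p A).map (fun j : Nat => idx + (j : Int))) := by
  intro A
  induction A with
  | nil =>
    intro idx B _ _ p _
    show B.getD p none = _
    cases hB : B.getD p none <;> rfl
  | cons a rest ih =>
    intro idx B hb hlen p hp
    have ha := hb a (by simp)
    have hget := pyGetD_pid X a B none hX ha.1 ha.2 hlen
    have hbr : ∀ x ∈ rest, 1 - X ≤ x ∧ x ≤ X := fun x hx => hb x (by simp [hx])
    by_cases h : B.getD (pid X a) none = none
    · have hcond : PySem.List.pyGetD B (a - 1) none = none := by rw [hget, h]
      have hset := pySetD_pid X a B (some idx) hX ha.1 ha.2 hlen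
      have hlen' : (B.set (pid X a) (some idx)).length = X.toNat := by simpa using hlen
      rw [aLoop, if_pos hcond, hset, ih (idx + 1) _ hbr hlen' p hp,
        getD_set B _ p _ none (by omega)]
      by_cases hpa : pid X a = p
      · subst hpa
        rw [h]
        simp [firstHit]
      · rw [if_neg hpa]
        cases hBp : B.getD p none with
        | some v => simp
        | none =>
          simp only [Option.none_or, firstHit, if_neg hpa]
          cases hf : firstHit X p rest with
          | none => simp
          | some j => simp; omega
    · have hcond : ¬ PySem.List.pyGetD B (a - 1) none = none := by rw [hget]; exact h
      rw [aLoop, if_neg hcond, ih (idx + 1) B hbr hlen p hp]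
      by_cases hpa : pid X a = p
      · subst hpa
        cases hBp : B.getD (pid X a) none with
        | none => exact absurd hBp h
        | some v => simp
      · cases hBp : B.getD p none with
        | some v => simp
        | none =>
          simp only [Option.none_or, firstHit, if_neg hpa]
          cases hf : firstHit X p rest with
          | none => simp
          | some j => simp; omega

-- ---------- B-side: counting pass ----------

lemma cntLoop_len (A : List Int) : ∀ (cnt : List Int),
    (cntLoop A cnt).length = cnt.length := by
  induction A with
  | nil => intro cnt; rfl
  | cons a rest ih =>
    intro cnt
    unfold cntLoop
    simp [ih]

lemma cntLoop_char (X : Int) (hX : 1 ≤ X) :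
    ∀ (A : List Int) (cnt : List Int),
    (∀ a ∈ A, 1 - X ≤ a ∧ a ≤ X) → cnt.length = X.toNat → ∀ p, p < X.toNat →
    (cntLoop A cnt).getD p 0 = cnt.getD p 0 + (hits X p A : Int) := by
  intro A
  induction A with
  | nil => intro cnt _ _ p _; simp [cntLoop, hits]
  | cons a rest ih =>
    intro cnt hb hlen p hp
    have ha := hb a (by simp)
    have hget := pyGetD_pid X a cnt 0 hX ha.1 ha.2 hlen
    have hset := pySetD_pid X a cnt (PySem.List.pyGetD cnt (a - 1) 0 + 1) hX ha.1 ha.2 hlen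
    have hbr : ∀ x ∈ rest, 1 - X ≤ x ∧ x ≤ X := fun x hx => hb x (by simp [hx])
    rw [cntLoop, hset, ih _ hbr (by simpa using hlen) p hp,
      getD_set _ _ p _ 0 (by omega), hget]
    by_cases hpa : pid X a = p
    · simp [hits, List.countP_cons, hpa]
      omega
    · simp [hits, List.countP_cons, hpa]

-- ---------- B-side: the reverse scan returns the latest first occurrence ----------

lemma hits_append_singleton (X : Int) (p : Nat) (L : List Int) (a : Int) :
    hits X p (L ++ [a]) = hits X p L + (if pid X a = p then 1 else 0) := by
  simp [hits, List.countP_append, List.countP_cons]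

lemma revLoop_spec (X : Int) (hX : 1 ≤ X) :
    ∀ (pref : List Int) (cnt : List Int),
    pref ≠ [] →
    (∀ a ∈ pref, 1 - X ≤ a ∧ a ≤ X) →
    cnt.length = X.toNat →
    (∀ p, p < X.toNat → cnt.getD p 0 = (hits X p pref : Int)) →
    ∃ r : Nat, revLoop pref.reverse ((pref.length : Int) - 1) cnt = (r : Int) ∧
      r < pref.length ∧
      hits X (pid X (pref.getD r 0)) (pref.take r) = 0 ∧
      ∀ j, r < j → j < pref.length → 1 ≤ hits X (pid X (pref.getD j 0)) (pref.take j) := by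
  intro pref
  induction pref using List.reverseRecOn with
  | nil => intro cnt hne; exact absurd rfl hne
  | append_singleton pref' a ih =>
    intro cnt _ hb hlen hcnt
    have ha := hb a (by simp)
    have hpa : pid X a < X.toNat := pid_lt X a hX ha.1 ha.2
    have hget := pyGetD_pid X a cnt 0 hX ha.1 ha.2 hlen
    have hcnta : cnt.getD (pid X a) 0 = (hits X (pid X a) (pref' ++ [a]) : Int) :=
      hcnt (pid X a) hpa
    have hsplit : hits X (pid X a) (pref' ++ [a]) = hits X (pid X a) pref' + 1 := by
      rw [hits_append_singleton]; simp
    have hc : PySem.List.pyGetD cnt (a - 1) 0 - 1 = (hits X (pid X a) pref' : Int) := by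
      rw [hget, hcnta, hsplit]; push_cast; ring
    have hrev : (pref' ++ [a]).reverse = a :: pref'.reverse := by simp
    have hlen1 : ((pref' ++ [a]).length : Int) - 1 = (pref'.length : Int) := by
      simp
    by_cases hz : hits X (pid X a) pref' = 0
    · -- the last element is a first occurrence: return here
      refine ⟨pref'.length, ?_, by simp, ?_, ?_⟩
      · rw [hrev, hlen1]
        show (if PySem.List.pyGetD cnt (a - 1) 0 - 1 = 0 then ((pref'.length : Int))
          else revLoop pref'.reverse (((pref'.length : Int)) - 1)
            (PySem.List.pySetD cnt (a - 1) (PySem.List.pyGetD cnt (a - 1) 0 - 1))) = _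
        rw [if_pos (by rw [hc]; exact_mod_cast hz)]
      · have hgd : (pref' ++ [a]).getD pref'.length 0 = a := by
          rw [List.getD_eq_getElem _ _ (by simp)]
          simp
        rw [hgd, List.take_left]
        exact hz
      · intro j h1 h2
        simp at h2
        omega
    · -- not a first occurrence: recurse on pref'
      have hz1 : 1 ≤ hits X (pid X a) pref' := by omega
      have hne' : pref' ≠ [] := by
        intro h; rw [h] at hz1; simp [hits] at hz1
      have hb' : ∀ x ∈ pref', 1 - X ≤ x ∧ x ≤ X := fun x hx => hb x (by simp [hx])
      have hcz : ¬ (PySem.List.pyGetD cnt (a - 1) 0 - 1 = 0) := by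
        rw [hc]
        exact_mod_cast hz
      have hset := pySetD_pid X a cnt (PySem.List.pyGetD cnt (a - 1) 0 - 1) hX ha.1 ha.2 hlen
      have hlen' : (cnt.set (pid X a) (PySem.List.pyGetD cnt (a - 1) 0 - 1)).length = X.toNat := by
        simpa using hlen
      have hcnt' : ∀ p, p < X.toNat →
          (cnt.set (pid X a) (PySem.List.pyGetD cnt (a - 1) 0 - 1)).getD p 0 =
            (hits X p pref' : Int) := by
        intro p hp
        rw [getD_set _ _ p _ 0 (by omega)]
        by_cases hpp : pid X a = p
        · rw [if_pos hpp, hc, hpp]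
        · rw [if_neg hpp, hcnt p hp]
          congr 1
          rw [hits_append_singleton, if_neg hpp]
          simp
      obtain ⟨r, hr1, hr2, hr3, hr4⟩ := ih _ hne' hb' hlen' hcnt'
      refine ⟨r, ?_, by simp; omega, ?_, ?_⟩
      · rw [hrev, hlen1]
        show (if PySem.List.pyGetD cnt (a - 1) 0 - 1 = 0 then ((pref'.length : Int))
          else revLoop pref'.reverse (((pref'.length : Int)) - 1)
            (PySem.List.pySetD cnt (a - 1) (PySem.List.pyGetD cnt (a - 1) 0 - 1))) = _
        rw [if_neg hcz, hset]
        exact hr1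
      · have hgd : (pref' ++ [a]).getD r 0 = pref'.getD r 0 := by
          rw [List.getD_eq_getElem _ _ (by simp; omega),
            List.getD_eq_getElem _ _ hr2, List.getElem_append_left hr2]
        rw [hgd, List.take_append_of_le_length (by omega)]
        exact hr3
      · intro j h1 h2
        simp at h2
        rcases Nat.lt_or_ge j pref'.length with hj | hj
        · have hgd : (pref' ++ [a]).getD j 0 = pref'.getD j 0 := by
            rw [List.getD_eq_getElem _ _ (by simp; omega),
              List.getD_eq_getElem _ _ hj, List.getElem_append_left hj]
          rw [hgd, List.take_append_of_le_length (by omega)]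
          exact hr4 j h1 hj
        · have hj' : j = pref'.length := by omega
          subst hj'
          have hgd : (pref' ++ [a]).getD pref'.length 0 = a := by
            rw [List.getD_eq_getElem _ _ (by simp)]
            simp
          rw [hgd, List.take_left]
          exact hz1

-- A's max over the completed table equals an index r that is an upper bound of all entries
lemma max_filterMap (B : List (Option Int)) (idx : Int)
    (hmem : some idx ∈ B) (hub : ∀ v : Int, some v ∈ B → v ≤ idx) :
    (PySem.List.max? (B.filterMap id) (fun v => v)).getD 0 = idx := by
  have hidx : idx ∈ B.filterMap id := List.mem_filterMap.mpr ⟨some idx, hmem, rfl⟩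
  cases hmax : PySem.List.max? (B.filterMap id) (fun v => v) with
  | none =>
    have hnil : B.filterMap id = [] := (PySem.List.max?_eq_none_iff _ _).mp hmax
    rw [hnil] at hidx
    simp at hidx
  | some m =>
    have hm : m ∈ B.filterMap id := PySem.List.max?_mem hmax
    obtain ⟨om, hom, hom2⟩ := List.mem_filterMap.mp hm
    have hom' : om = some m := by simpa using hom2
    have h1 : m ≤ idx := hub m (hom' ▸ hom)
    have h2 : idx ≤ m := PySem.List.max?_isMax hmax idx hidx
    simp [le_antisymm h1 h2]

-- ===== VERDICT (by name: the statement is the Claim_ definition above) =====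
theorem solution_spec : Claim_equal_solution := by
  intro X A _ hpre
  obtain ⟨hX, hb⟩ := hpre
  unfold Spec_solution solution solution_alt
  have hN : 1 ≤ X.toNat := by omega
  -- characterize A's finished table
  set T := aLoop A 0 (List.replicate X.toNat none) with hTdef
  have hTlen : T.length = X.toNat := by rw [hTdef, aLoop_len]; simp
  have hT : ∀ p, p < X.toNat → T.getD p none = (firstHit X p A).map (fun j : Nat => (j : Int)) := by
    intro p hp
    rw [hTdef, aLoop_char X hX A 0 _ hb (by simp) p hp]
    have : (List.replicate X.toNat (none : Option Int)).getD p none = none := by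
      rw [List.getD_eq_getElem _ _ (by simpa using hp)]
      simp
    rw [this, Option.none_or]
    cases firstHit X p A <;> simp
  -- characterize B's count table
  set C := cntLoop A (List.replicate X.toNat (0 : Int)) with hCdef
  have hClen : C.length = X.toNat := by rw [hCdef, cntLoop_len]; simp
  have hC : ∀ p, p < X.toNat → C.getD p 0 = (hits X p A : Int) := by
    intro p hp
    rw [hCdef, cntLoop_char X hX A _ hb (by simp) p hp]
    rw [List.getD_eq_getElem _ _ (by simpa using hp)]
    simp
  by_cases hz : (0 : Int) ∈ C
  · -- some position is never covered: both return -1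
    obtain ⟨q, hq, hq0⟩ := List.mem_iff_getElem.mp hz
    have hqN : q < X.toNat := by omega
    have hhits : hits X q A = 0 := by
      have := hC q hqN
      rw [List.getD_eq_getElem _ _ hq, hq0] at this
      exact_mod_cast this.symm
    have hfh : firstHit X q A = none := (firstHit_none_iff X q A).mpr hhits
    have hTq : T.getD q none = none := by rw [hT q hqN, hfh]; rfl
    have hnone : none ∈ T := by
      have hq' : q < T.length := by omega
      have : T[q] = none := by
        have := hTq
        rwa [List.getD_eq_getElem _ _ hq'] at this
      exact this ▸ List.getElem_mem hq'
    simp only [hz, if_pos, hnone, not_true_eq_false, if_false, if_true]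
  · -- full coverage: A returns max of first occurrences, B's reverse scan finds it
    have hcov : ∀ p, p < X.toNat → 1 ≤ hits X p A := by
      intro p hp
      by_contra h
      have h0 : hits X p A = 0 := by omega
      apply hz
      have hp' : p < C.length := by omega
      have : C[p] = 0 := by
        have := hC p hp
        rw [List.getD_eq_getElem _ _ hp', h0] at this
        simpa using this
      exact this ▸ List.getElem_mem hp'
    have hAne : A ≠ [] := by
      intro h
      have := hcov 0 (by omega)
      rw [h] at this
      simp [hits] at this
    have hnone : ¬ (none ∈ T) := by
      intro hmem
      obtain ⟨q, hq, hq0⟩ := List.mem_iff_getElem.mp hmem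
      have hqN : q < X.toNat := by omega
      have : T.getD q none = none := by rw [List.getD_eq_getElem _ _ hq, hq0]
      rw [hT q hqN] at this
      have hfh : firstHit X q A = none := by
        cases h : firstHit X q A with
        | none => rfl
        | some j => rw [h] at this; simp at this
      have := (firstHit_none_iff X q A).mp hfh
      have := hcov q hqN
      omega
    obtain ⟨r, hr1, hr2, hr3, hr4⟩ := revLoop_spec X hX A C hAne hb hClen hC
    simp only [hz, if_false, hnone, not_false_eq_true, if_true]
    rw [hr1]
    -- A's max equals r
    have hrA : A.getD r 0 = A[r] := List.getD_eq_getElem A 0 hr2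
    have haR := hb (A[r]) (List.getElem_mem hr2)
    have hpR : pid X (A[r]) < X.toNat := pid_lt X _ hX haR.1 haR.2
    have hfhR : firstHit X (pid X (A[r])) A = some r :=
      firstHit_of X _ A r hr2 rfl (by rw [hrA] at hr3; exact hr3)
    apply max_filterMap
    · -- some r ∈ T
      have hTp : T.getD (pid X (A[r])) none = some (r : Int) := by
        rw [hT _ hpR, hfhR]; rfl
      have hp' : pid X (A[r]) < T.length := by omega
      have : T[pid X (A[r])] = some (r : Int) := by
        rwa [List.getD_eq_getElem _ _ hp'] at hTp
      exact this ▸ List.getElem_mem hp'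
    · -- every entry of T is ≤ r
      intro v hv
      obtain ⟨q, hq, hq0⟩ := List.mem_iff_getElem.mp hv
      have hqN : q < X.toNat := by omega
      have hTq : T.getD q none = some v := by rw [List.getD_eq_getElem _ _ hq, hq0]
      rw [hT q hqN] at hTq
      obtain ⟨j, hj1, hj2⟩ : ∃ j, firstHit X q A = some j ∧ (j : Int) = v := by
        cases h : firstHit X q A with
        | none => rw [h] at hTq; simp at hTq
        | some j => rw [h] at hTq; exact ⟨j, rfl, by simpa using hTq⟩
      obtain ⟨hjlt, hjpid, hjtake⟩ := firstHit_some X q A j hj1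
      by_contra hgt
      rw [not_le] at hgt
      have hrj : r < j := by omega
      have := hr4 j hrj hjlt
      rw [List.getD_eq_getElem A 0 hjlt, hjpid] at this
      omega
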